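-- pv_equiv track=rewrite | github.com/numairmansur/InformationRetrival | lecture-05/qgram_index.py | compute_ped
-- ===== SOURCE A (Python) =====
-- def compute_ped(p, s):
--     """ Compute the prefix edit distance PED(p, s).
--
--     >>> QgramIndex.compute_ped("shwartz", "schwarzenegger")
--     2
--     """
--
--     n, m = len(p), len(s)
--     bound = m + 1
--
--     current_row = list(range(bound))
--     for i in list(range(1, n + 1)):
--         previous_row = current_row
--         current_row = [i] + [0] * (bound - 1)
--         for j in list(range(1, bound)):
--             insert = previous_row[j] + 1
--             delete = current_row[j - 1] + 1
--             replace = previous_row[j - 1]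
--             if s[j - 1] != p[i - 1]:
--                 replace += 1
--             current_row[j] = min(insert, delete, replace)
--
--     return min(current_row)
-- ===== SOURCE B (Python) =====
-- def compute_ped(p, s):
--     """Prefix edit distance PED(p, s), computed top-down: a memoized recursive
--     helper d(i, j) for the edit-distance recurrence (dict keyed on (i, j)),
--     with min taken over the whole last row d(n, j) so that p must be fully
--     consumed while s is matched to any prefix."""
--     n, m = len(p), len(s)
--     memo = {}
--
--     def d(i, j):
--         r = memo.get((i, j))
--         if r is not None:
--             return r
--         if i == 0:
--             r = j
--         elif j == 0:
--             r = i
--         else: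
--             r = min(d(i - 1, j) + 1,
--                     d(i, j - 1) + 1,
--                     d(i - 1, j - 1) + (0 if p[i - 1] == s[j - 1] else 1))
--         memo[(i, j)] = r
--         return r
--
--     # evaluate the cells in an order that keeps the recursion shallow
--     # (avoids hitting Python's recursion limit on long inputs)
--     for i in range(n + 1):
--         for j in range(m + 1):
--             d(i, j)
--
--     return min(d(n, j) for j in range(m + 1))
-- ===== Notes on version B (the rewrite author's own statement) =====
-- stated objective: alternative
-- what changed: Replaces A's bottom-up rolling-row DP (nested index loops over two row lists, min of the final row) with a top-down memoized recursive helper d(i,j) over a dict keyed on (i,j), driven by min(d(n,j) for j in range(m+1)).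
import Mathlib
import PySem

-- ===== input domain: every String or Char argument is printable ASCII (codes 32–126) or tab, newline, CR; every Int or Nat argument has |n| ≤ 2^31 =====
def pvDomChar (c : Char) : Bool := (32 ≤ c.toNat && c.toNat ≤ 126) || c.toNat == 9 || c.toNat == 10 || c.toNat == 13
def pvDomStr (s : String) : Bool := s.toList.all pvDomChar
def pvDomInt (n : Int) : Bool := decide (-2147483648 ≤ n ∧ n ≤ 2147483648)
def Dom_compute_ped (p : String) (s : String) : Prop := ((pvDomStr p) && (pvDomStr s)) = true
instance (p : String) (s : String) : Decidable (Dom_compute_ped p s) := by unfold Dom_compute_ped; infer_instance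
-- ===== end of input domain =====

-- B replaces A's bottom-up rolling-row DP by a top-down memoized recursion
-- d(i, j) over a dict keyed on (i, j) (same O(n·m) cost; no speed claim).

-- ===== PORT A =====
-- Literal port of A's rolling-row DP.  All indices A uses are provably in
-- range, so pyGetD/pySetD (the total forms, exact under in-range indices)
-- port the subscripts; `min a (min b c)` is Python's `min(a, b, c)`;
-- `min?.getD 0` ports `min(current_row)` (current_row is never empty).
def compute_ped (p : String) (s : String) : Int :=
  let pl := p.toList
  let sl := s.toList
  let n := pl.length
  let m := sl.length
  let bound := m + 1
  let current_row : List Int := PySem.List.pyRange 0 (bound : Int) 1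
  let final := (PySem.List.pyRange 1 ((n : Int) + 1) 1).foldl
    (fun current_row i =>
      let previous_row := current_row
      let start : List Int := i :: List.replicate (bound - 1) 0
      (PySem.List.pyRange 1 (bound : Int) 1).foldl
        (fun cur j =>
          let ins := PySem.List.pyGetD previous_row j 0 + 1
          let del := PySem.List.pyGetD cur (j - 1) 0 + 1
          let rep0 := PySem.List.pyGetD previous_row (j - 1) 0
          let rep := if PySem.List.pyGetD sl (j - 1) ' ' ≠ PySem.List.pyGetD pl (i - 1) ' '
                     then rep0 + 1 else rep0
          PySem.List.pySetD cur j (min ins (min del rep)))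
        start)
    current_row
  (PySem.List.min? final (fun x => x)).getD 0

-- ===== PORT B =====
-- Literal port of Source B's memoized recursive helper d(i, j): the memo dict is
-- threaded through explicitly; `memo.get((i,j))` is Dict.get?; the recursion
-- is on the Nat pair (i, j) exactly as Python recurses on nonnegative i, j.
def pedGo (pl sl : List Char) (i j : Nat) (memo : PySem.Dict (Int × Int) Int) :
    Int × PySem.Dict (Int × Int) Int :=
  match memo.get? ((i : Int), (j : Int)) with
  | some r => (r, memo)
  | none =>
    match i, j with
    | 0, j => ((j : Int), memo.insert ((0 : Int), (j : Int)) (j : Int))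
    | i+1, 0 => (((i : Int) + 1), memo.insert (((i : Int) + 1, (0 : Int))) ((i : Int) + 1))
    | i+1, j+1 =>
      let r1 := pedGo pl sl i (j+1) memo
      let r2 := pedGo pl sl (i+1) j r1.2
      let r3 := pedGo pl sl i j r2.2
      let r := min (r1.1 + 1) (min (r2.1 + 1)
        (r3.1 + (if pl.getD i ' ' == sl.getD j ' ' then 0 else 1)))
      (r, r3.2.insert (((i : Int) + 1, (j : Int) + 1)) r)
termination_by (i, j)

-- Driver of Source B: the shallow-recursion warm-up sweep (only the memo is kept),
-- then `min(d(n, j) for j in range(m+1))` as a running minimum over the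
-- generator (Option Int is the 'no element seen yet' state of Python's min).
def compute_ped_alt (p : String) (s : String) : Int :=
  let pl := p.toList
  let sl := s.toList
  let n := pl.length
  let m := sl.length
  let memo0 : PySem.Dict (Int × Int) Int := PySem.Dict.empty
  let memo1 := (List.range (n+1)).foldl
    (fun mm i => (List.range (m+1)).foldl (fun mm2 j => (pedGo pl sl i j mm2).2) mm) memo0
  let fin := (List.range (m+1)).foldl
    (fun (st : PySem.Dict (Int × Int) Int × Option Int) j =>
      let r := pedGo pl sl n j st.1
      (r.2, match st.2 with | none => some r.1 | some b => some (min b r.1)))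
    (memo1, none)
  fin.2.getD 0

-- ===== PRECONDITION & SPEC =====
def Spec_compute_ped (p : String) (s : String) (out : Int) : Prop := out = compute_ped_alt p s
instance (p : String) (s : String) (out : Int) : Decidable (Spec_compute_ped p s out) := by unfold Spec_compute_ped; infer_instance

-- ===== CLAIM (what is proved, stated in full; the proofs are below) =====
def Claim_equal_compute_ped : Prop := ∀ (p : String) (s : String), Dom_compute_ped p s → Spec_compute_ped p s (compute_ped p s)

-- ===== LEMMAS AND PROOFS =====

-- The edit-distance table D(i, j) both programs tabulate (i indexes p, j indexes s).
def pedD (pl sl : List Char) : Nat → Nat → Int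
  | 0, j => (j : Int)
  | (i+1), 0 => ((i : Int) + 1)
  | (i+1), (j+1) =>
      min (pedD pl sl i (j+1) + 1)
        (min (pedD pl sl (i+1) j + 1)
          (pedD pl sl i j + (if sl.getD j ' ' ≠ pl.getD i ' ' then 1 else 0)))

lemma pedD_zero_left (pl sl : List Char) (j : Nat) : pedD pl sl 0 j = (j : Int) := by
  simp [pedD]

-- Row i of the table (A walks these) and A's final running minimum.
def rowFun (pl sl : List Char) (i : Nat) : List Int :=
  (List.range (sl.length + 1)).map (fun j => pedD pl sl i j)

def bestVal (pl sl : List Char) : Int :=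
  ((List.range' 1 sl.length).map (fun t => pedD pl sl pl.length t)).foldl min
    (pedD pl sl pl.length 0)

-- A's outer-loop body, named (definitionally the lambda inside compute_ped).
def FA (pl sl : List Char) (current_row : List Int) (i : Int) : List Int :=
  let previous_row := current_row
  let start : List Int := i :: List.replicate (sl.length + 1 - 1) 0
  (PySem.List.pyRange 1 ((sl.length + 1 : Nat) : Int) 1).foldl
    (fun cur j =>
      let ins := PySem.List.pyGetD previous_row j 0 + 1
      let del := PySem.List.pyGetD cur (j - 1) 0 + 1
      let rep0 := PySem.List.pyGetD previous_row (j - 1) 0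
      let rep := if PySem.List.pyGetD sl (j - 1) ' ' ≠ PySem.List.pyGetD pl (i - 1) ' '
                 then rep0 + 1 else rep0
      PySem.List.pySetD cur j (min ins (min del rep)))
    start

-- ------- A side -------

-- Row i+1 filled in up to column k (cells beyond k still hold the 0 placeholder).
def partRow (pl sl : List Char) (i k : Nat) : List Int :=
  (List.range (sl.length + 1)).map (fun j => if j ≤ k then pedD pl sl (i+1) j else 0)

lemma partRow_zero (pl sl : List Char) (i : Nat) :
    (((i : Int) + 1) :: List.replicate (sl.length + 1 - 1) 0) = partRow pl sl i 0 := by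
  simp only [partRow, Nat.add_sub_cancel, List.range_succ_eq_map, List.map_cons, List.map_map]
  congr 1
  · simp [pedD]
  · rw [show (List.replicate sl.length (0 : Int)) = (List.range sl.length).map (fun _ => (0:Int)) by
      simp [List.map_const']]
    apply List.map_congr_left
    intro a _
    simp [Function.comp]

lemma innerA_step (pl sl : List Char) (i k : Nat) (hk : k < sl.length) :
    (fun cur j =>
      let ins := PySem.List.pyGetD (rowFun pl sl i) j 0 + 1
      let del := PySem.List.pyGetD cur (j - 1) 0 + 1
      let rep0 := PySem.List.pyGetD (rowFun pl sl i) (j - 1) 0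
      let rep := if PySem.List.pyGetD sl (j - 1) ' ' ≠ PySem.List.pyGetD pl (((i : Int) + 1) - 1) ' '
                 then rep0 + 1 else rep0
      PySem.List.pySetD cur j (min ins (min del rep)))
      (partRow pl sl i k) (((k : Int)) + 1) = partRow pl sl i (k+1) := by
  have hj1 : ((k : Int) + 1) - 1 = ((k : Nat) : Int) := by ring
  have hi1 : ((i : Int) + 1) - 1 = ((i : Nat) : Int) := by ring
  have hj : ((k : Int) + 1) = ((k + 1 : Nat) : Int) := by push_cast; ring
  simp only [hj1, hi1]
  simp only [hj, PySem.List.pyGetD_natCast, PySem.List.pySetD_natCast]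
  unfold rowFun partRow
  rw [PySem.List.getD_map_range _ _ _ _ (by omega), PySem.List.getD_map_range _ _ _ _ (by omega),
      PySem.List.getD_map_range _ _ _ _ (by omega)]
  apply List.ext_getElem (by simp)
  intro idx h1 h2
  simp only [List.getElem_set, List.getElem_map, List.getElem_range] at *
  by_cases hidx : k + 1 = idx
  · subst hidx
    rw [if_pos rfl, if_pos (by omega : k + 1 ≤ k + 1)]
    simp only [le_refl, if_true]
    conv_rhs => rw [pedD]
    split_ifs <;> omega
  · rw [if_neg hidx]
    by_cases hle : idx ≤ k
    · rw [if_pos hle, if_pos (by omega : idx ≤ k + 1)]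
    · rw [if_neg hle, if_neg (show ¬ idx ≤ k + 1 by omega)]

lemma innerA_loop (pl sl : List Char) (i k : Nat) (hk : k ≤ sl.length) :
    (PySem.List.pyRange 1 ((k : Int) + 1) 1).foldl
      (fun cur j =>
        let ins := PySem.List.pyGetD (rowFun pl sl i) j 0 + 1
        let del := PySem.List.pyGetD cur (j - 1) 0 + 1
        let rep0 := PySem.List.pyGetD (rowFun pl sl i) (j - 1) 0
        let rep := if PySem.List.pyGetD sl (j - 1) ' ' ≠ PySem.List.pyGetD pl (((i : Int) + 1) - 1) ' '
                   then rep0 + 1 else rep0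
        PySem.List.pySetD cur j (min ins (min del rep)))
      (((i : Int) + 1) :: List.replicate (sl.length + 1 - 1) 0)
      = partRow pl sl i k := by
  induction k with
  | zero =>
    rw [show (((0 : Nat) : Int) + 1) = 1 by norm_num, PySem.List.pyRange_one_eq_nil le_rfl,
      List.foldl_nil]
    exact partRow_zero pl sl i
  | succ k ih =>
    rw [show (((k + 1 : Nat) : Int) + 1) = (((k : Nat) : Int) + 1) + 1 by push_cast; ring,
      PySem.List.pyRange_one_succ_right (by omega), List.foldl_append, ih (by omega),
      List.foldl_cons, List.foldl_nil]
    exact innerA_step pl sl i k (by omega)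

lemma FA_row (pl sl : List Char) (i : Nat) :
    FA pl sl (rowFun pl sl i) ((i : Int) + 1) = rowFun pl sl (i + 1) := by
  simp only [FA]
  rw [show (((sl.length + 1 : Nat)) : Int) = ((sl.length : Int) + 1) by push_cast; ring,
    innerA_loop pl sl i sl.length le_rfl]
  unfold partRow rowFun
  apply List.map_congr_left
  intro a ha
  rw [List.mem_range] at ha
  rw [if_pos (by omega)]

lemma outerA (pl sl : List Char) (i : Nat) :
    (PySem.List.pyRange 1 ((i : Int) + 1) 1).foldl (FA pl sl) (rowFun pl sl 0)
      = rowFun pl sl i := by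
  induction i with
  | zero =>
    rw [show (((0 : Nat) : Int) + 1) = 1 by norm_num, PySem.List.pyRange_one_eq_nil le_rfl,
      List.foldl_nil]
  | succ i ih =>
    rw [show (((i + 1 : Nat) : Int) + 1) = (((i : Nat) : Int) + 1) + 1 by push_cast; ring,
      PySem.List.pyRange_one_succ_right (by omega), List.foldl_append, ih,
      List.foldl_cons, List.foldl_nil]
    exact FA_row pl sl i

lemma rowFun_zero (pl sl : List Char) :
    PySem.List.pyRange 0 ((sl.length + 1 : Nat) : Int) 1 = rowFun pl sl 0 := by
  rw [PySem.List.pyRange_zero_nat]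
  unfold rowFun
  apply List.map_congr_left
  intro a _
  simp [pedD]

lemma A_final (p s : String) :
    compute_ped p s = bestVal p.toList s.toList := by
  have hrow : rowFun p.toList s.toList p.toList.length
      = pedD p.toList s.toList p.toList.length 0 ::
        (List.range' 1 s.toList.length).map (fun t => pedD p.toList s.toList p.toList.length t) := by
    unfold rowFun
    rw [List.range_eq_range', List.range'_succ, List.map_cons]
  show (PySem.List.min?
      ((PySem.List.pyRange 1 ((p.toList.length : Int) + 1) 1).foldl
        (FA p.toList s.toList)
        (PySem.List.pyRange 0 ((s.toList.length + 1 : Nat) : Int) 1))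
      (fun x => x)).getD 0 = _
  rw [rowFun_zero, outerA, hrow, PySem.List.min?_id_cons, Option.getD_some]
  rfl

-- ------- B side -------

-- Memo invariant: every entry the dict holds is a correct table value.
def MemoOK (pl sl : List Char) (memo : PySem.Dict (Int × Int) Int) : Prop :=
  ∀ (a b : Nat) (v : Int), memo.get? ((a : Int), (b : Int)) = some v → v = pedD pl sl a b

lemma memoOK_empty (pl sl : List Char) : MemoOK pl sl PySem.Dict.empty := by
  intro a b v h
  rw [PySem.Dict.get?_empty] at h
  exact absurd h (by simp)

lemma memoOK_insert (pl sl : List Char) (memo : PySem.Dict (Int × Int) Int)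
    (hm : MemoOK pl sl memo) (i j : Nat) (v : Int) (hv : v = pedD pl sl i j) :
    MemoOK pl sl (memo.insert ((i : Int), (j : Int)) v) := by
  intro a b w h
  rw [PySem.Dict.get?_insert] at h
  by_cases hk : ((a : Int), (b : Int)) = ((i : Int), (j : Int))
  · rw [if_pos hk] at h
    have ha : a = i := by
      have := congrArg Prod.fst hk; simpa using this
    have hb : b = j := by
      have := congrArg Prod.snd hk; simpa using this
    subst ha; subst hb
    cases h; exact hv
  · rw [if_neg hk] at h
    exact hm a b w h

lemma delta_eq (pl sl : List Char) (i j : Nat) :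
    ((if pl.getD i ' ' == sl.getD j ' ' then (0 : Int) else 1))
      = (if sl.getD j ' ' ≠ pl.getD i ' ' then (1 : Int) else 0) := by
  by_cases h : pl.getD i ' ' = sl.getD j ' '
  · rw [if_pos (beq_iff_eq.mpr h), if_neg (fun hn => hn h.symm)]
  · rw [if_neg (by simpa using h), if_pos (fun e => h e.symm)]

lemma pedGo_spec (pl sl : List Char) :
    ∀ (i j : Nat) (memo : PySem.Dict (Int × Int) Int), MemoOK pl sl memo →
      (pedGo pl sl i j memo).1 = pedD pl sl i j ∧ MemoOK pl sl (pedGo pl sl i j memo).2 := by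
  intro i
  induction i with
  | zero =>
    intro j memo hm
    rw [pedGo]
    split
    next r h => exact ⟨hm 0 j r h, hm⟩
    next h =>
      refine ⟨(pedD_zero_left pl sl j).symm, ?_⟩
      have := memoOK_insert pl sl memo hm 0 j ((j : Nat) : Int) (pedD_zero_left pl sl j).symm
      simpa using this
  | succ i ih =>
    intro j
    induction j with
    | zero =>
      intro memo hm
      rw [pedGo]
      split
      next r h => exact ⟨hm (i+1) 0 r h, hm⟩
      next h =>
        have hval : ((i : Int) + 1) = pedD pl sl (i+1) 0 := by rw [pedD]
        refine ⟨hval, ?_⟩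
        have := memoOK_insert pl sl memo hm (i+1) 0 ((i : Int) + 1) hval
        simpa using this
    | succ j ihj =>
      intro memo hm
      rw [pedGo]
      split
      next r h => exact ⟨hm (i+1) (j+1) r h, hm⟩
      next h =>
        simp only []
        obtain ⟨h1v, h1m⟩ := ih (j+1) memo hm
        obtain ⟨h2v, h2m⟩ := ihj (pedGo pl sl i (j+1) memo).2 h1m
        obtain ⟨h3v, h3m⟩ := ih j (pedGo pl sl (i+1) j (pedGo pl sl i (j+1) memo).2).2 h2m
        have hval : min ((pedGo pl sl i (j+1) memo).1 + 1)
            (min ((pedGo pl sl (i+1) j (pedGo pl sl i (j+1) memo).2).1 + 1)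
              ((pedGo pl sl i j (pedGo pl sl (i+1) j (pedGo pl sl i (j+1) memo).2).2).1 +
                (if pl.getD i ' ' == sl.getD j ' ' then 0 else 1)))
            = pedD pl sl (i+1) (j+1) := by
          rw [h1v, h2v, h3v, delta_eq]
          conv_rhs => rw [pedD]
        refine ⟨hval, ?_⟩
        have := memoOK_insert pl sl _ h3m (i+1) (j+1) _ hval
        simpa using this

-- The warm-up sweep only threads the memo: it preserves the invariant.
lemma sweep_inner_ok (pl sl : List Char) (i : Nat) (l : List Nat)
    (memo : PySem.Dict (Int × Int) Int) (hm : MemoOK pl sl memo) :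
    MemoOK pl sl (l.foldl (fun mm2 j => (pedGo pl sl i j mm2).2) memo) := by
  induction l generalizing memo with
  | nil => exact hm
  | cons j l ih => exact ih _ ((pedGo_spec pl sl i j memo hm).2)

lemma sweep_ok (pl sl : List Char) (m : Nat) (l : List Nat)
    (memo : PySem.Dict (Int × Int) Int) (hm : MemoOK pl sl memo) :
    MemoOK pl sl (l.foldl
      (fun mm i => (List.range (m+1)).foldl (fun mm2 j => (pedGo pl sl i j mm2).2) mm) memo) := by
  induction l generalizing memo with
  | nil => exact hm
  | cons i l ih => exact ih _ (sweep_inner_ok pl sl i _ memo hm)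

-- The final fold's Option component is the running minimum of the table's last row.
lemma finFold (pl sl : List Char) (js : List Nat) :
    ∀ (memo : PySem.Dict (Int × Int) Int), MemoOK pl sl memo → ∀ (acc : Option Int),
    (js.foldl
      (fun (st : PySem.Dict (Int × Int) Int × Option Int) j =>
        let r := pedGo pl sl pl.length j st.1
        (r.2, match st.2 with | none => some r.1 | some b => some (min b r.1)))
      (memo, acc)).2
    = js.foldl
        (fun o j => match o with
          | none => some (pedD pl sl pl.length j)
          | some b => some (min b (pedD pl sl pl.length j))) acc := by
  induction js with
  | nil => intro memo hm acc; rfl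
  | cons j js ih =>
    intro memo hm acc
    obtain ⟨hv, hmok⟩ := pedGo_spec pl sl pl.length j memo hm
    simp only [List.foldl_cons]
    rw [ih _ hmok]
    cases acc <;> simp [hv]

lemma minFold_some (pl sl : List Char) (l : List Nat) :
    ∀ (a : Int),
    (l.foldl
      (fun o j => match o with
        | none => some (pedD pl sl pl.length j)
        | some b => some (min b (pedD pl sl pl.length j))) (some a))
    = some ((l.map (fun j => pedD pl sl pl.length j)).foldl min a) := by
  induction l with
  | nil => intro a; rfl
  | cons j l ih => intro a; simp only [List.foldl_cons, List.map_cons]; exact ih _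

lemma B_final (p s : String) :
    compute_ped_alt p s = bestVal p.toList s.toList := by
  unfold compute_ped_alt
  simp only []
  have hmok := sweep_ok p.toList s.toList s.toList.length (List.range (p.toList.length + 1))
    PySem.Dict.empty (memoOK_empty p.toList s.toList)
  rw [finFold p.toList s.toList _ _ hmok]
  rw [show List.range (s.toList.length + 1) = 0 :: List.range' 1 s.toList.length by
    rw [List.range_eq_range', List.range'_succ]]
  rw [List.foldl_cons]
  simp only []
  rw [minFold_some]
  unfold bestVal
  rw [Option.getD_some]

-- ===== VERDICT (by name: the statement is the Claim_ definition above) =====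
theorem compute_ped_spec : Claim_equal_compute_ped := by
  intro p s _
  unfold Spec_compute_ped
  rw [A_final, B_final]
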